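-- pv_equiv track=rewrite | github.com/hi9900/algorithm | 프로그래머스/courses/알고리즘 문제 해설/5_땅따먹기/sol.py | solution
-- ===== SOURCE A (Python) =====
-- def solution(land):
--     N = len(land)
--
--     data = [[0] * 4 for _ in range(N)]
--     data[0] = land[0]
--
--     for i in range(1, N):
--         for j in range(4):
--             data[i][j] = land[i][j] + max(data[i-1][:j] + data[i-1][j+1:])
--
--     return max(data[-1])
-- ===== SOURCE B (Python) =====
-- def solution(land):
--     prev = land[0]
--     for row in land[1:]:
--         # one scan of prev: max, its (first) index, and second-best
--         m1, i1, m2 = prev[0], 0, None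
--         for j in range(1, len(prev)):
--             v = prev[j]
--             if v > m1:
--                 m2, m1, i1 = m1, v, j
--             elif m2 is None or v > m2:
--                 m2 = v
--         prev = [row[j] + (m2 if j == i1 else m1) for j in range(4)]
--     return max(prev)
-- ===== Notes on version B (the rewrite author's own statement) =====
-- stated objective: alternative
-- what changed: Replaces the per-column max over a sliced copy of the previous row (and the preallocated 2-D table) by a single scan per row computing the previous row's max, argmax and second-best, from which every new column is filled in O(1) with a rolling row.
import Mathlib
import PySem

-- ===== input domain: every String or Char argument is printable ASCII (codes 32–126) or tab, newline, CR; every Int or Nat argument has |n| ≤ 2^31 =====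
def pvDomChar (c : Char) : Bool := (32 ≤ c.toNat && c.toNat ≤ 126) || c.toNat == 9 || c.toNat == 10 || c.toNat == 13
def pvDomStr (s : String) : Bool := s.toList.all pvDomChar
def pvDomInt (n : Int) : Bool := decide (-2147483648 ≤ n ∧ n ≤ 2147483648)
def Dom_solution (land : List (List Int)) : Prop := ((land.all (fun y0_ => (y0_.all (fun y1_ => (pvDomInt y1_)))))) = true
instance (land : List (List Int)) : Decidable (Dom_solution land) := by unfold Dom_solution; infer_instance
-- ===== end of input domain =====

-- B replaces A's per-column max over sliced copies of the previous row by one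
-- max/argmax/second-best scan per row with a rolling previous row (objective: alternative algorithm).

-- ===== PORT A =====
-- A's table 'data' only ever reads row i-1 to build row i, so the fold carries the
-- previous row; each cell j is land[i][j] + max(prev[:j] + prev[j+1:]) exactly as in A.
def solutionRowA (prev row : List Int) : List Int :=
  (PySem.List.pyRange 0 4 1).map (fun j =>
    PySem.List.pyGetD row j 0 +
      ((PySem.List.max? (PySem.List.slice prev none (some j) ++ PySem.List.slice prev (some (j + 1)) none)
          (fun y => y)).getD 0))

def solution (land : List (List Int)) : Int :=
  match land with
  | [] => 0  -- Python raises IndexError here (data[0] = land[0]); excluded by Pre_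
  | r0 :: rest =>
    let last := rest.foldl solutionRowA r0
    (PySem.List.max? last (fun y => y)).getD 0

-- ===== PORT B =====
-- one scan of prev: max m1, its first index i1, and the second-best m2 (m2 = m1 on a tie)
def solutionTop2 (xs : List Int) : Int × Int × Option Int :=
  match xs with
  | [] => (0, 0, none)  -- Source B raises IndexError on xs[0]; excluded by Pre_
  | x :: _ =>
    (PySem.List.pyRange 1 (xs.length : Int) 1).foldl
      (fun s j =>
        let v := PySem.List.pyGetD xs j 0
        if s.1 < v then (v, j, some s.1)
        else if s.2.2.isNone || s.2.2.getD 0 < v then (s.1, s.2.1, some v)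
        else s)
      (x, (0 : Int), (none : Option Int))

def solutionRowB (prev row : List Int) : List Int :=
  let t := solutionTop2 prev
  (PySem.List.pyRange 0 4 1).map (fun j =>
    PySem.List.pyGetD row j 0 + (if j = t.2.1 then t.2.2.getD 0 else t.1))

def solution_alt (land : List (List Int)) : Int :=
  match land with
  | [] => 0  -- Source B raises IndexError on land[0]; excluded by Pre_
  | r0 :: rest =>
    let prev := rest.foldl solutionRowB r0
    (PySem.List.max? prev (fun y => y)).getD 0

-- ===== PRECONDITION & SPEC =====
-- Pre_ is exactly the inputs where A returns normally: a non-empty grid, every row after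
-- the first has at least 4 columns, and the first row is non-empty (at least 2 columns
-- when more rows follow, since max(data[0][:0]+data[0][1:]) raises on a 1-column first row).
def Pre_solution (land : List (List Int)) : Prop :=
  land ≠ [] ∧ (∀ r ∈ land.tail, 4 ≤ r.length) ∧
    (if land.tail = [] then land.headI ≠ [] else 2 ≤ land.headI.length)
instance (land : List (List Int)) : Decidable (Pre_solution land) := by
  unfold Pre_solution; infer_instance

def pvWitness_solution : List (List Int) := [[1, 2, 3, 5], [5, 6, 7, 8], [4, 3, 2, 1]]

def Spec_solution (land : List (List Int)) (out : Int) : Prop := out = solution_alt land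
instance (land : List (List Int)) (out : Int) : Decidable (Spec_solution land out) := by
  unfold Spec_solution; infer_instance

-- ===== CLAIM (what is proved, stated in full; the proofs are below) =====
def Claim_equal_solution : Prop :=
  ∀ (land : List (List Int)), Dom_solution land → Pre_solution land →
    Spec_solution land (solution land)

-- ===== LEMMAS AND PROOFS =====

-- the body of B's scan, named for the proofs
def t2Step (xs : List Int) (s : Int × Int × Option Int) (j : Int) : Int × Int × Option Int :=
  let v := PySem.List.pyGetD xs j 0
  if s.1 < v then (v, j, some s.1)
  else if s.2.2.isNone || s.2.2.getD 0 < v then (s.1, s.2.1, some v)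
  else s

theorem top2_eq_fold (x : Int) (t : List Int) :
    solutionTop2 (x :: t) =
      (PySem.List.pyRange 1 ((x :: t).length : Int) 1).foldl (t2Step (x :: t)) (x, 0, none) := rfl

-- what the scan state means about the processed list
def GoodT2 (xs : List Int) (s : Int × Int × Option Int) : Prop :=
  (∀ k, (hk : k < xs.length) → xs[k] ≤ s.1) ∧
  (∃ i, ∃ _ : i < xs.length, s.2.1 = (i : Int) ∧ xs[i] = s.1) ∧
  (∀ m2, s.2.2 = some m2 →
    (∀ k, (hk : k < xs.length) → (k : Int) ≠ s.2.1 → xs[k] ≤ m2) ∧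
    ∃ k, ∃ _ : k < xs.length, (k : Int) ≠ s.2.1 ∧ xs[k] = m2) ∧
  (s.2.2 = none → xs.length = 1)

theorem top2_snoc (xs : List Int) (v : Int) (h : xs ≠ []) :
    solutionTop2 (xs ++ [v]) = t2Step (xs ++ [v]) (solutionTop2 xs) (xs.length : Int) := by
  rcases xs with _ | ⟨x, t⟩
  · exact absurd rfl h
  · rw [show (x :: t) ++ [v] = x :: (t ++ [v]) from rfl, top2_eq_fold, top2_eq_fold,
      show ((x :: (t ++ [v])).length : Int) = ((x :: t).length : Int) + 1 by simp,
      PySem.List.pyRange_one_succ_right (by simp), List.foldl_append]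
    simp only [List.foldl_cons, List.foldl_nil]
    congr 1
    · apply PySem.List.foldl_congr_mem
      intro acc j hj
      rw [PySem.List.mem_pyRange_one] at hj
      have h2' : j < ((x :: t).length : Int) := hj.2
      have hgd : PySem.List.pyGetD (x :: (t ++ [v])) j 0 = PySem.List.pyGetD (x :: t) j 0 := by
        rw [show x :: (t ++ [v]) = (x :: t) ++ [v] from rfl,
            PySem.List.pyGetD_eq_getElem (xs := (x :: t) ++ [v]) (i := j) (d := 0)
              (by omega) (by have := h2'; simp at this ⊢; omega),
            PySem.List.pyGetD_eq_getElem (xs := x :: t) (i := j) (d := 0)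
              (by omega) (by simpa using h2'),
            List.getElem_append_left (by simpa using h2')]
      unfold t2Step
      rw [hgd]

theorem good_t2Step (xs : List Int) (v : Int) (s : Int × Int × Option Int)
    (hg : GoodT2 xs s) :
    GoodT2 (xs ++ [v]) (t2Step (xs ++ [v]) s (xs.length : Int)) := by
  obtain ⟨hub, ⟨i, hi, hieq, hival⟩, hsome, hnone⟩ := hg
  have hv : PySem.List.pyGetD (xs ++ [v]) (xs.length : Int) 0 = v := by
    have := PySem.List.pyGet?_append_length (pre := xs) (y := v) (ys := ([] : List Int))
    simp [PySem.List.pyGetD]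
  have hget : ∀ k, (hk : k < xs.length) → (xs ++ [v])[k]'(by simp; omega) = xs[k] :=
    fun k hk => List.getElem_append_left hk
  have hgetv : (xs ++ [v])[xs.length]'(by simp) = v := by simp
  unfold t2Step
  rw [hv]
  by_cases h1 : s.1 < v
  · rw [if_pos h1]
    unfold GoodT2
    simp only []
    refine ⟨?_, ⟨xs.length, by simp, rfl, by simp⟩, ?_, by simp⟩
    · intro k hk
      simp only [List.length_append, List.length_cons, List.length_nil] at hk
      rcases Nat.lt_or_ge k xs.length with hk' | hk'
      · rw [hget k hk']; exact le_of_lt (lt_of_le_of_lt (hub k hk') h1)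
      · have : k = xs.length := by omega
        subst this; rw [hgetv]
    · intro m2 hm2
      injection hm2 with hm2; subst hm2
      constructor
      · intro k hk hne
        simp only [List.length_append, List.length_cons, List.length_nil] at hk
        have hk' : k < xs.length := by
          rcases Nat.lt_or_ge k xs.length with h | h
          · exact h
          · exfalso; exact hne (by congr 1; omega)
        rw [hget k hk']; exact hub k hk'
      · refine ⟨i, by simp; omega, ?_, by rw [hget i hi]; exact hival⟩
        have : (i : Int) < (xs.length : Int) := by exact_mod_cast hi
        omega
  · rw [if_neg h1]
    by_cases h2 : (s.2.2.isNone || decide (s.2.2.getD 0 < v)) = true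
    · rw [if_pos h2]
      unfold GoodT2
      simp only []
      refine ⟨?_, ⟨i, by simp; omega, hieq, by rw [hget i hi]; exact hival⟩, ?_, by simp⟩
      · intro k hk
        simp only [List.length_append, List.length_cons, List.length_nil] at hk
        rcases Nat.lt_or_ge k xs.length with hk' | hk'
        · rw [hget k hk']; exact hub k hk'
        · have : k = xs.length := by omega
          subst this; rw [hgetv]; omega
      · intro m2 hm2
        injection hm2 with hm2; subst hm2
        constructor
        · intro k hk hne
          simp only [List.length_append, List.length_cons, List.length_nil] at hk
          rcases Nat.lt_or_ge k xs.length with hk' | hk'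
          · rw [hget k hk']
            rcases hs : s.2.2 with _ | m2'
            · -- old second was None: xs had a single element, its index is s.2.1
              have hx1 : xs.length = 1 := hnone hs
              have hk0 : k = 0 := by omega
              subst hk0
              exfalso
              have hi0 : i = 0 := by omega
              exact hne (by rw [hieq, hi0])
            · have hlt : m2' < v := by
                simp [hs] at h2; exact h2
              exact le_trans ((hsome m2' hs).1 k hk' hne) (le_of_lt hlt)
          · have : k = xs.length := by omega
            subst this; rw [hgetv]
        · refine ⟨xs.length, by simp, ?_, hgetv⟩
          rw [hieq]
          have : (i : Int) < (xs.length : Int) := by exact_mod_cast hi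
          omega
    · rw [if_neg h2]
      simp only [Bool.or_eq_true, decide_eq_true_eq, not_or, Option.isNone_iff_eq_none] at h2
      obtain ⟨hnn, hnlt⟩ := h2
      rcases hs : s.2.2 with _ | m2'
      · exact absurd hs hnn
      have hvle : v ≤ m2' := by rw [hs] at hnlt; simp at hnlt; omega
      obtain ⟨hub2, k0, hk0, hk0ne, hk0val⟩ := hsome m2' hs
      refine ⟨?_, ⟨i, by simp; omega, hieq, by rw [hget i hi]; exact hival⟩, ?_,
        fun hc => absurd hc hnn⟩
      · intro k hk
        simp only [List.length_append, List.length_cons, List.length_nil] at hk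
        rcases Nat.lt_or_ge k xs.length with hk' | hk'
        · rw [hget k hk']; exact hub k hk'
        · have hke : k = xs.length := by omega
          subst hke; rw [hgetv]; omega
      · intro m2 hm2
        rw [hs] at hm2; injection hm2 with hm2; subst hm2
        constructor
        · intro k hk hne
          simp only [List.length_append, List.length_cons, List.length_nil] at hk
          rcases Nat.lt_or_ge k xs.length with hk' | hk'
          · rw [hget k hk']; exact hub2 k hk' hne
          · have hke : k = xs.length := by omega
            subst hke; rw [hgetv]; exact hvle
        · exact ⟨k0, by simp; omega, hk0ne, by rw [hget k0 hk0]; exact hk0val⟩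

theorem good_top2 (xs : List Int) (h : xs ≠ []) : GoodT2 xs (solutionTop2 xs) := by
  induction xs using List.reverseRecOn with
  | nil => exact absurd rfl h
  | append_singleton ys v ih =>
    rcases ys with _ | ⟨y, t⟩
    · refine ⟨?_, ⟨0, by simp, rfl, by simp [solutionTop2]⟩, ?_, fun _ => by simp⟩
      · intro k hk
        simp only [List.nil_append, List.length_cons, List.length_nil] at hk
        have : k = 0 := by omega
        subst this; simp [solutionTop2]
      · intro m2 hm2
        simp [solutionTop2] at hm2
    · rw [top2_snoc _ _ (by simp)]
      exact good_t2Step _ v _ (ih (by simp))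

-- an element of xs at an index other than n is in xs with that index deleted
theorem mem_take_drop_of_ne (xs : List Int) (n k : Nat) (hk : k < xs.length) (hne : k ≠ n) :
    xs[k] ∈ xs.take n ++ xs.drop (n + 1) := by
  rw [List.mem_append]
  rcases Nat.lt_or_ge k n with h | h
  · left
    rw [List.mem_iff_getElem]
    exact ⟨k, by simp; omega, by rw [List.getElem_take]⟩
  · right
    have hk' : n + 1 ≤ k := by omega
    rw [List.mem_iff_getElem]
    refine ⟨k - (n + 1), by simp; omega, ?_⟩
    rw [List.getElem_drop]
    congr 1; omega

theorem mem_take_drop_elim (xs : List Int) (n : Nat) (y : Int)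
    (hy : y ∈ xs.take n ++ xs.drop (n + 1)) :
    ∃ k, ∃ _ : k < xs.length, k ≠ n ∧ xs[k] = y := by
  rw [List.mem_append] at hy
  rcases hy with hy | hy
  · rw [List.mem_iff_getElem] at hy
    obtain ⟨k, hk, hval⟩ := hy
    simp only [List.length_take] at hk
    refine ⟨k, by omega, by omega, ?_⟩
    rw [← hval, List.getElem_take]
  · rw [List.mem_iff_getElem] at hy
    obtain ⟨k, hk, hval⟩ := hy
    simp only [List.length_drop] at hk
    refine ⟨n + 1 + k, by omega, by omega, ?_⟩
    rw [← hval, List.getElem_drop]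

-- per-column agreement: A's max over the previous row with column j removed equals
-- B's choice from the (max, argmax, second-best) summary
theorem col_eq (xs : List Int) (h2 : 2 ≤ xs.length) (j : Int) (hj : 0 ≤ j) :
    ((PySem.List.max? (PySem.List.slice xs none (some j) ++ PySem.List.slice xs (some (j + 1)) none)
        (fun y => y)).getD 0) =
      (if j = (solutionTop2 xs).2.1 then (solutionTop2 xs).2.2.getD 0 else (solutionTop2 xs).1) := by
  obtain ⟨hub, ⟨i, hi, hieq, hival⟩, hsome, hnone⟩ := good_top2 xs (by intro hc; subst hc; simp at h2)
  set s := solutionTop2 xs with hs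
  rcases hm2o : s.2.2 with _ | m2
  · have := hnone hm2o; omega
  obtain ⟨hub2, k0, hk0, hk0ne, hk0val⟩ := hsome m2 hm2o
  have hjt : (j + 1).toNat = j.toNat + 1 := by omega
  rw [PySem.List.slice_to xs hj, PySem.List.slice_from xs (by omega), hjt]
  set n := j.toNat with hn
  have hjn : j = (n : Int) := by omega
  set l := xs.take n ++ xs.drop (n + 1) with hl
  have hlne : l ≠ [] := by
    intro hc
    have := congrArg List.length hc
    simp only [hl, List.length_append, List.length_take, List.length_drop, List.length_nil] at this
    omega
  rcases hmax : PySem.List.max? l (fun y => y) with _ | m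
  · rw [PySem.List.max?_eq_none_iff] at hmax
    exact absurd hmax hlne
  have hmem := PySem.List.max?_mem hmax
  have hismax := PySem.List.max?_isMax hmax
  simp only [Option.getD_some]
  by_cases hji : j = s.2.1
  · -- removed column is the argmax: both sides are the second-best
    rw [if_pos hji]
    have hni : n = i := by rw [hieq] at hji; omega
    subst hni
    apply le_antisymm
    · obtain ⟨k, hk, hkne, hkval⟩ := mem_take_drop_elim xs n m hmem
      rw [← hkval]
      exact hub2 k hk (by rw [hieq]; intro hc; exact hkne (by omega))
    · rw [← hk0val]
      apply hismax
      exact mem_take_drop_of_ne xs n k0 hk0 (by rw [hieq] at hk0ne; intro hc; subst hc; exact hk0ne rfl)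
  · -- removed column is not the argmax: both sides are the max
    rw [if_neg hji]
    apply le_antisymm
    · obtain ⟨k, hk, _, hkval⟩ := mem_take_drop_elim xs n m hmem
      rw [← hkval]; exact hub k hk
    · rw [← hival]
      apply hismax
      apply mem_take_drop_of_ne xs n i hi
      intro hc; subst hc; exact hji (by rw [hieq, hjn])

theorem solutionRow_eq (prev row : List Int) (h : 2 ≤ prev.length) :
    solutionRowA prev row = solutionRowB prev row := by
  unfold solutionRowA solutionRowB
  apply List.map_congr_left
  intro j hj
  rw [PySem.List.mem_pyRange_one] at hj
  rw [col_eq prev h j hj.1]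

theorem solutionRowB_length (prev row : List Int) : (solutionRowB prev row).length = 4 := by
  simp [solutionRowB, PySem.List.length_pyRange_one]

theorem fold_rows_eq (rest : List (List Int)) (prev : List Int) (h : 2 ≤ prev.length) :
    rest.foldl solutionRowA prev = rest.foldl solutionRowB prev := by
  induction rest generalizing prev with
  | nil => rfl
  | cons r t ih =>
    simp only [List.foldl, solutionRow_eq prev r h]
    exact ih _ (by rw [solutionRowB_length]; norm_num)

-- ===== VERDICT (by name: the statement is the Claim_ definition above) =====
theorem solution_spec : Claim_equal_solution := by
  intro land _ hpre
  obtain ⟨hne, _, hhead⟩ := hpre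
  unfold Spec_solution solution solution_alt
  match land, hne with
  | r0 :: rest, _ =>
    rcases rest with _ | ⟨r1, t⟩
    · rfl
    · simp only [List.tail_cons, List.headI] at hhead
      simp only [if_neg (by simp : (r1 :: t : List (List Int)) ≠ [])] at hhead
      simp only []
      rw [fold_rows_eq (r1 :: t) r0 hhead]
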